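-- pv_equiv track=rewrite | github.com/Mahniba/p2-25-coding-challenges-ds | exercise 35.py | csv
-- ===== SOURCE A (Python) =====
-- def csv(text):
--     values = []
--     n = 0
--     text = text. split(",")
--     for i in text:
--         values.insert(n,list(i))
--         n += 1
--     return values
-- ===== SOURCE B (Python) =====
-- def csv(text):
--     # Single pass over the characters: no split(), no index-based insert.
--     result = []
--     current = []
--     for ch in text:
--         if ch == ',':
--             result.append(current)
--             current = []
--         else:
--             current.append(ch)
--     result.append(current)
--     return result
-- ===== Notes on version B (the rewrite author's own statement) =====
-- stated objective: alternative
-- what changed: Replaces the two-phase comma-split-then-convert with a single character-by-character scan that builds the pieces directly, and replaces the counted list.insert with plain appends.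
import Mathlib
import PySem

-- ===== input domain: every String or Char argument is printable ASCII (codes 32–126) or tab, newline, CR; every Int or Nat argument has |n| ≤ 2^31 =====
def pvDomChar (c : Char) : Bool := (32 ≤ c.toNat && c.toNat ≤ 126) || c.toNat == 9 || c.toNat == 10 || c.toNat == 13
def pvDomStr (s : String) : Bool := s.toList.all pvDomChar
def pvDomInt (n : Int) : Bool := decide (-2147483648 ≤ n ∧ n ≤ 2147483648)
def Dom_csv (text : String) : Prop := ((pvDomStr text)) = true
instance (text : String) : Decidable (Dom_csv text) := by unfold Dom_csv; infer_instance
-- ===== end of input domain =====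

-- B replaces split(",")-then-list(piece) with a single character scan building pieces directly (alternative decomposition, same cost).


-- ===== PORT A =====
-- text.split(","): sep is nonempty, so Python's split is PySem.Chars.splitOn on the char list,
-- each piece turned back into a String; list(i) is the list of one-character strings of i.
def csv (text : String) : List (List String) :=
  let pieces : List String := (PySem.Chars.splitOn text.toList [',']).map String.ofList
  (pieces.foldl
    (fun (st : List (List String) × Int) i =>
      (PySem.List.insert st.1 st.2 (i.toList.map (fun c => String.ofList [c])), st.2 + 1))
    (([] : List (List String)), (0 : Int))).1

-- ===== PORT B =====
def csv_alt (text : String) : List (List String) :=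
  let st := text.toList.foldl
    (fun (st : List (List String) × List String) ch =>
      if ch = ',' then (st.1 ++ [st.2], ([] : List String))
      else (st.1, st.2 ++ [String.ofList [ch]]))
    (([] : List (List String)), ([] : List String))
  st.1 ++ [st.2]

-- ===== PRECONDITION & SPEC =====
def Spec_csv (text : String) (out : List (List String)) : Prop := out = csv_alt text
instance (text : String) (out : List (List String)) : Decidable (Spec_csv text out) := by unfold Spec_csv; infer_instance

-- ===== CLAIM (what is proved, stated in full; the proofs are below) =====
def Claim_equal_csv : Prop := ∀ (text : String), Dom_csv text → Spec_csv text (csv text)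

-- ===== LEMMAS AND PROOFS =====

/-- Reference splitter on char lists: current piece `cur`, remaining input `l`. -/
def mysplitC (cur : List Char) (l : List Char) : List (List Char) :=
  match l with
  | [] => [cur]
  | c :: r => if c = ',' then cur :: mysplitC [] r else mysplitC (cur ++ [c]) r

/-- `PySem.Chars.splitOn.go` with enough fuel computes `mysplitC`. -/
theorem go_eq_mysplitC (fuel : Nat) (l cur : List Char) (acc : List (List Char))
    (h : l.length ≤ fuel) :
    PySem.Chars.splitOn.go [','] fuel l cur acc = acc.reverse ++ mysplitC cur.reverse l := by
  induction fuel generalizing l cur acc with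
  | zero =>
    have : l = [] := by cases l <;> simp_all
    subst this
    simp [PySem.Chars.splitOn.go, mysplitC]
  | succ fuel ih =>
    cases l with
    | nil => simp [PySem.Chars.splitOn.go, mysplitC]
    | cons c r =>
      by_cases hc : c = ','
      · subst hc
        rw [show PySem.Chars.splitOn.go [','] (fuel+1) (','::r) cur acc
            = PySem.Chars.splitOn.go [','] fuel (List.drop 1 (','::r)) [] (cur.reverse :: acc) by
          simp [PySem.Chars.splitOn.go, List.isPrefixOf]]
        rw [ih _ _ _ (by simpa using Nat.le_of_succ_le_succ (by simpa using h))]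
        simp [mysplitC]
      · rw [show PySem.Chars.splitOn.go [','] (fuel+1) (c::r) cur acc
            = PySem.Chars.splitOn.go [','] fuel r (c :: cur) acc by
          simp [PySem.Chars.splitOn.go, List.isPrefixOf, Ne.symm hc]]
        rw [ih _ _ _ (by simpa using Nat.le_of_succ_le_succ (by simpa using h))]
        simp [mysplitC, hc]

theorem splitOn_comma (s : List Char) :
    PySem.Chars.splitOn s [','] = mysplitC [] s := by
  rw [PySem.Chars.splitOn, go_eq_mysplitC _ _ _ _ (by omega)]
  simp

/-- Inserting at the current length is appending. -/
theorem insert_at_length {α : Type} (xs : List α) (v : α) :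
    PySem.List.insert xs (xs.length : Int) v = xs ++ [v] := by
  simp only [PySem.List.insert, PySem.List.sliceIndices]
  rw [if_neg (by omega)]
  simp

/-- A's counted-insert fold is a map-append. -/
theorem csv_fold (pieces : List String) (acc : List (List String)) :
    (pieces.foldl
      (fun (st : List (List String) × Int) i =>
        (PySem.List.insert st.1 st.2 (i.toList.map (fun c => String.ofList [c])), st.2 + 1))
      (acc, (acc.length : Int))).1
    = acc ++ pieces.map (fun i => i.toList.map (fun c => String.ofList [c])) := by
  induction pieces generalizing acc with
  | nil => simp
  | cons p r ih =>
    simp only [List.foldl_cons, insert_at_length]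
    have := ih (acc ++ [p.toList.map (fun c => String.ofList [c])])
    simp only [List.length_append, List.length_cons, List.length_nil] at this ⊢
    rw [show ((acc.length : Int) + 1) = ((acc.length + (0+1) : Nat) : Int) by push_cast; ring, this]
    simp

/-- B's scan fold computes `mysplitC` (mapped to one-char strings). -/
theorem alt_fold (l : List Char) (res : List (List String)) (cur : List Char) :
    (let st := l.foldl
      (fun (st : List (List String) × List String) ch =>
        if ch = ',' then (st.1 ++ [st.2], ([] : List String))
        else (st.1, st.2 ++ [String.ofList [ch]]))
      (res, cur.map (fun c => String.ofList [c]))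
     st.1 ++ [st.2])
    = res ++ (mysplitC cur l).map (fun cs => cs.map (fun c => String.ofList [c])) := by
  induction l generalizing res cur with
  | nil => simp [mysplitC]
  | cons c r ih =>
    by_cases hc : c = ','
    · subst hc
      simpa [mysplitC] using ih (res ++ [cur.map (fun c => String.ofList [c])]) []
    · simpa [mysplitC, hc] using ih res (cur ++ [c])

-- ===== VERDICT (by name: the statement is the Claim_ definition above) =====
theorem csv_spec : Claim_equal_csv := by
  intro text _
  unfold Spec_csv csv csv_alt
  rw [splitOn_comma]
  have hA := csv_fold ((mysplitC [] text.toList).map String.ofList) []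
  simp only [List.length_nil, Int.natCast_zero] at hA
  rw [hA]
  have hB := alt_fold text.toList [] []
  simp only [List.map_nil] at hB
  rw [hB]
  simp [List.map_map, Function.comp_def]
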